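-- pv_equiv track=rewrite | github.com/hitogava/ADS | tsp/tsp.py | gen_submasks
-- ===== SOURCE A (Python) =====
-- def gen_submasks(ans, mask, i, nbits, n):
--     if n < 0:
--         return ans
--     if nbits not in ans:
--         ans[nbits] = set()
--     ans[nbits].add(mask)
--     gen_submasks(ans, mask, i + 1, nbits, n - 1)
--     gen_submasks(ans, mask | (1 << i), i + 1, nbits + 1, n - 1)
--
--     return ans
-- ===== SOURCE B (Python) =====
-- def gen_submasks(ans, mask, i, nbits, n):
--     # Iterative: enumerate all 2**n choice vectors s (MSB of s <-> position i),
--     # instead of A's binary recursion.  Mutates ans in place, like A.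
--     if n < 0:
--         return ans
--     for s in range(1 << n):
--         m = mask
--         cnt = 0
--         for b in range(n):
--             if (s // (1 << (n - 1 - b))) % 2 == 1:
--                 m |= 1 << (i + b)
--                 cnt += 1
--         key = nbits + cnt
--         if key not in ans:
--             ans[key] = set()
--         ans[key].add(m)
--     return ans
-- ===== Notes on version B (the rewrite author's own statement) =====
-- stated objective: alternative
-- what changed: Replaces A's exponential binary recursion (two recursive calls per bit, adding the partial mask at every tree node) with a flat double loop that enumerates the 2^n choice vectors as integers and adds each completed mask once, using no recursion and O(1) extra state.
import Mathlib
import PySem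

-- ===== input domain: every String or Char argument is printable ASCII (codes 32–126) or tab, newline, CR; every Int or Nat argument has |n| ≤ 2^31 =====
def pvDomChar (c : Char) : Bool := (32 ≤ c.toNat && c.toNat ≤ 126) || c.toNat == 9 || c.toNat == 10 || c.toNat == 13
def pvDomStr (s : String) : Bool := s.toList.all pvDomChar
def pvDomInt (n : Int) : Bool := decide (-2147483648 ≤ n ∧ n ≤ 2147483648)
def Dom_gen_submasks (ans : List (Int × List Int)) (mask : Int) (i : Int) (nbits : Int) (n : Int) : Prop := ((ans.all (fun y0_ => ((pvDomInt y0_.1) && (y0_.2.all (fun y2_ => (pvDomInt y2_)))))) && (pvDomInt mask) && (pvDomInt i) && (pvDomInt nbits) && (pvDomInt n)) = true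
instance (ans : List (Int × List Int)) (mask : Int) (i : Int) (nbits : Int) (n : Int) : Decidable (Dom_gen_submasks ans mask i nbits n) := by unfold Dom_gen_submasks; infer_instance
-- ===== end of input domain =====

-- B replaces A's binary recursion by a flat integer enumeration of the 2^n choice
-- vectors (alternative decomposition, not claimed faster); both A and B mutate the
-- dict argument in place in Python — the equivalence proved here is about the
-- returned dict, which is that same object.


-- ===== PORT A =====
-- shared transliteration of the common Python lines
--   if k not in d: d[k] = set()
--   d[k].add(m)        (ported as Dict.modify on the now-present key)
def pyAdd (d : PySem.Dict Int (PySem.Set Int)) (m : Int) (k : Int) : PySem.Dict Int (PySem.Set Int) :=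
  let d1 := if d.contains k then d else d.insert k PySem.Set.empty
  d1.modify k PySem.Set.empty (fun st => PySem.Set.add st m)

def genSubA (d : PySem.Dict Int (PySem.Set Int)) (mask i nbits n : Int) : PySem.Dict Int (PySem.Set Int) :=
  if n < 0 then d
  else
    let d1 := pyAdd d mask nbits
    let d2 := genSubA d1 mask (i + 1) nbits (n - 1)
    -- 1 << i : Pre_ guarantees 0 ≤ i whenever this line is reached
    let d3 := genSubA d2 (PySem.Int.bor mask ((1 : Int) <<< i.toNat)) (i + 1) (nbits + 1) (n - 1)
    d3
termination_by (n + 1).toNat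
decreasing_by all_goals omega

def gen_submasks (ans : List (Int × List Int)) (mask : Int) (i : Int) (nbits : Int) (n : Int) : List (Int × List Int) :=
  (genSubA (PySem.Dict.mk ans) mask i nbits n).items

-- ===== PORT B =====
-- body of Source B's inner 'for b in range(n)' loop
def innerStep (s n i : Int) (p : Int × Int) (b : Int) : Int × Int :=
  if PySem.Int.mod (PySem.Int.floordiv s ((1 : Int) <<< (n - 1 - b).toNat)) 2 = 1 then
    (PySem.Int.bor p.1 ((1 : Int) <<< (i + b).toNat), p.2 + 1)
  else p

-- body of Source B's outer 'for s in range(1 << n)' loop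
def outerStep (mask i nbits n : Int) (a : PySem.Dict Int (PySem.Set Int)) (s : Int) : PySem.Dict Int (PySem.Set Int) :=
  let mc := (PySem.List.pyRange 0 n 1).foldl (innerStep s n i) (mask, 0)
  pyAdd a mc.1 (nbits + mc.2)

def genSubB (d : PySem.Dict Int (PySem.Set Int)) (mask i nbits n : Int) : PySem.Dict Int (PySem.Set Int) :=
  if n < 0 then d
  else (PySem.List.pyRange 0 ((1 : Int) <<< n.toNat) 1).foldl (outerStep mask i nbits n) d

def gen_submasks_alt (ans : List (Int × List Int)) (mask : Int) (i : Int) (nbits : Int) (n : Int) : List (Int × List Int) :=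
  (genSubB (PySem.Dict.mk ans) mask i nbits n).items

-- ===== PRECONDITION & SPEC =====
-- Pre_ excludes exactly the inputs on which the Python A raises instead of returning:
-- n ≥ 0 with i < 0 ('1 << i' → ValueError), and n ≥ 997, where A's recursion depth
-- exceeds CPython's default recursion limit (RecursionError, raised immediately).
def Pre_gen_submasks (ans : List (Int × List Int)) (mask : Int) (i : Int) (nbits : Int) (n : Int) : Prop :=
  (n < 0 ∨ 0 ≤ i) ∧ n < 997
instance (ans : List (Int × List Int)) (mask : Int) (i : Int) (nbits : Int) (n : Int) : Decidable (Pre_gen_submasks ans mask i nbits n) := by unfold Pre_gen_submasks; infer_instance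
def pvWitness_gen_submasks : (List (Int × List Int)) × Int × Int × Int × Int := ([(0, [3])], 5, 1, 0, 2)

def Spec_gen_submasks (ans : List (Int × List Int)) (mask : Int) (i : Int) (nbits : Int) (n : Int) (out : List (Int × List Int)) : Prop := out = gen_submasks_alt ans mask i nbits n
instance (ans : List (Int × List Int)) (mask : Int) (i : Int) (nbits : Int) (n : Int) (out : List (Int × List Int)) : Decidable (Spec_gen_submasks ans mask i nbits n out) := by unfold Spec_gen_submasks; infer_instance

-- ===== CLAIM (what is proved, stated in full; the proofs are below) =====
def Claim_equal_gen_submasks : Prop := ∀ (ans : List (Int × List Int)) (mask : Int) (i : Int) (nbits : Int) (n : Int), Dom_gen_submasks ans mask i nbits n → Pre_gen_submasks ans mask i nbits n → Spec_gen_submasks ans mask i nbits n (gen_submasks ans mask i nbits n)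

-- ===== LEMMAS AND PROOFS =====

-- the inner loop of B as a structural recursion peeling the most significant choice bit
def innerRec (s i : Int) : Nat → Int → Int → Int × Int
  | 0, m, c => (m, c)
  | k + 1, m, c =>
    if PySem.Int.mod (PySem.Int.floordiv s ((1 : Int) <<< k)) 2 = 1 then
      innerRec s (i + 1) k (PySem.Int.bor m ((1 : Int) <<< i.toNat)) (c + 1)
    else innerRec s (i + 1) k m c

lemma set_add_add (v : PySem.Set Int) (m : Int) :
    PySem.Set.add (PySem.Set.add v m) m = PySem.Set.add v m := by
  simp [PySem.Set.add]; split_ifs with h1 <;> simp_all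
lemma pyAdd_idem (d : PySem.Dict Int (PySem.Set Int)) (m k : Int) :
    pyAdd (pyAdd d m k) m k = pyAdd d m k := by
  unfold pyAdd PySem.Dict.modify
  simp only []
  rw [if_pos (by simp [PySem.Dict.contains_insert_self])]
  rw [PySem.Dict.getD_insert_self, set_add_add, PySem.Dict.insert_insert_self]
lemma genSubA_absorb (d : PySem.Dict Int (PySem.Set Int)) (m i k n : Int) (h : 0 ≤ n) :
    genSubA (pyAdd d m k) m i k n = genSubA d m i k n := by
  rw [genSubA, genSubA, if_neg (by omega), if_neg (by omega)]
  simp only [pyAdd_idem]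
lemma inner_bridge (N : Nat) : ∀ (s i m c : Int),
    (PySem.List.pyRange 0 (N : Int) 1).foldl (innerStep s (N : Int) i) (m, c) = innerRec s i N m c := by
  induction N with
  | zero => intro s i m c; simp [innerRec]
  | succ N ih =>
    intro s i m c
    rw [PySem.List.pyRange_one]
    have h1 : (((N : Int) + 1) - 0).toNat = N + 1 := by omega
    push_cast
    rw [h1, List.range_succ_eq_map, List.map_cons, List.map_map, List.foldl_cons, List.foldl_map]
    have hstep0 : innerStep s ((N : Int) + 1) i (m, c) (0 + ((0 : Nat) : Int)) =
        if PySem.Int.mod (PySem.Int.floordiv s ((1 : Int) <<< N)) 2 = 1 then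
          (PySem.Int.bor m ((1 : Int) <<< i.toNat), c + 1) else (m, c) := by
      simp [innerStep]
    have hfun : ∀ (p : Int × Int) (x : Nat), innerStep s ((N:Int)+1) i p ((fun k => 0 + (k : Int)) (Nat.succ x)) = innerStep s (N:Int) (i+1) p (0 + (x : Int)) := by
      intro p x
      have e1 : ((N:Int) + 1 - 1 - (0 + ((Nat.succ x : Nat) : Int))) = ((N:Int) - 1 - (0 + (x:Int))) := by push_cast; ring
      have e2 : i + (0 + ((Nat.succ x : Nat) : Int)) = (i + 1) + (0 + (x:Int)) := by push_cast; ring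
      simp only [innerStep, e1, e2]
    have key : ∀ (m c : Int), List.foldl (fun p x => innerStep s ((N:Int)+1) i p ((fun k => 0 + (k : Int)) (Nat.succ x))) (m, c) (List.range N) = innerRec s (i+1) N m c := by
      intro m c
      have h := ih s (i+1) m c
      rw [PySem.List.pyRange_one] at h
      have h2 : ((N : Int) - 0).toNat = N := by omega
      rw [h2, List.foldl_map] at h
      rw [← h]
      simp only [hfun]
    rw [hstep0]
    show List.foldl _ _ _ = innerRec s i (N+1) m c
    rw [innerRec]
    split_ifs with hc
    · exact key _ _
    · exact key _ _
lemma innerRec_shift (k : Nat) : ∀ (s i m c : Int),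
    innerRec s i k m c = ((innerRec s i k m 0).1, c + (innerRec s i k m 0).2) := by
  induction k with
  | zero => intro s i m c; simp [innerRec]
  | succ k ih =>
    intro s i m c
    rw [innerRec, innerRec]
    split_ifs with hc
    · rw [ih s (i+1) _ (c+1), ih s (i+1) _ (0+1)]
      simp; ring_nf
    · exact ih s (i+1) m c
lemma innerRec_low (k : Nat) (s i m c : Int) (h0 : 0 ≤ s) (h1 : s < 2 ^ k) :
    innerRec s i (k + 1) m c = innerRec s (i + 1) k m c := by
  rw [innerRec]
  rw [if_neg]
  rw [Int.shiftLeft_eq, one_mul, PySem.Int.floordiv_eq_ediv_of_pos (by positivity)]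
  rw [Int.ediv_eq_zero_of_lt h0 h1]
  simp [PySem.Int.mod]
lemma innerRec_high (N : Nat) : ∀ (k : Nat), k ≤ N → ∀ (s i m c : Int), 0 ≤ s →
    innerRec ((2 : Int) ^ N + s) i k m c = innerRec s i k m c := by
  intro k
  induction k generalizing N with
  | zero => intro _ s i m c _; simp [innerRec]
  | succ k ih =>
    intro hkN s i m c hs
    rw [innerRec, innerRec]
    have hcond : PySem.Int.mod (PySem.Int.floordiv ((2:Int)^N + s) ((1 : Int) <<< k)) 2
        = PySem.Int.mod (PySem.Int.floordiv s ((1 : Int) <<< k)) 2 := by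
      rw [Int.shiftLeft_eq, one_mul]
      rw [PySem.Int.floordiv_eq_ediv_of_pos (by positivity), PySem.Int.floordiv_eq_ediv_of_pos (by positivity)]
      have hNk : k + (N - k) = N := by omega
      have e : (2:Int)^N + s = s + 2^k * 2^(N-k) := by
        rw [← pow_add, hNk, add_comm]
      rw [e, Int.add_mul_ediv_left _ _ (by positivity)]
      rw [PySem.Int.mod_eq_emod_of_pos (by norm_num), PySem.Int.mod_eq_emod_of_pos (by norm_num)]
      obtain ⟨M, hM⟩ : ∃ M, N - k = M + 1 := ⟨N - k - 1, by omega⟩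
      have e2 : s / 2^k + (2:Int)^(N-k) = s / 2^k + 2 * 2^M := by
        rw [hM, pow_succ]; ring
      rw [e2, Int.add_mul_emod_self_left]
    rw [hcond]
    split_ifs with hc
    · exact ih (N := N) (by omega) _ _ _ _ hs
    · exact ih (N := N) (by omega) _ _ _ _ hs

lemma main_eq (N : Nat) : ∀ (d : PySem.Dict Int (PySem.Set Int)) (mask i nbits : Int),
    genSubA d mask i nbits (N : Int) = genSubB d mask i nbits (N : Int) := by
  induction N with
  | zero =>
    intro d mask i nbits
    rw [genSubA, genSubB]
    norm_num
    rw [genSubA, if_pos (by norm_num), genSubA, if_pos (by norm_num)]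
    have hr : PySem.List.pyRange 0 1 1 = [0] := by decide
    rw [hr]
    simp [outerStep]
  | succ N ih =>
    intro d mask i nbits
    have hcast : ((N + 1 : Nat) : Int) = (N : Int) + 1 := by push_cast; ring
    rw [hcast]
    have hNnn : ¬ ((N : Int) + 1 < 0) := by omega
    have hN0 : ¬ ((N : Int) < 0) := by omega
    have htN : ((N : Int)).toNat = N := by omega
    have hpowN : (1:Int) <<< ((N:Int)).toNat = 2 ^ N := by rw [htN, Int.shiftLeft_eq, one_mul]
    -- bridge at n = N and n = N+1, with Int casts normalised
    have hbN : ∀ (s i m c : Int), (PySem.List.pyRange 0 (N : Int) 1).foldl (innerStep s (N : Int) i) (m, c) = innerRec s i N m c :=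
      inner_bridge N
    have hbN1 : ∀ (s i m c : Int), (PySem.List.pyRange 0 ((N : Int) + 1) 1).foldl (innerStep s ((N : Int) + 1) i) (m, c) = innerRec s i (N + 1) m c := by
      intro s i m c
      have h := inner_bridge (N + 1) s i m c
      push_cast at h
      exact h
    -- A side
    rw [genSubA, if_neg hNnn]
    simp only [add_sub_cancel_right]
    rw [genSubA_absorb _ _ _ _ _ (by omega)]
    rw [ih, ih]
    -- B side
    have htN1 : ((N : Int) + 1).toNat = N + 1 := by omega
    have hpow : (1:Int) <<< ((N : Int) + 1).toNat = 2 ^ (N + 1) := by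
      rw [htN1, Int.shiftLeft_eq, one_mul]
    have hle : (2:Int)^N ≤ 2^(N+1) := pow_le_pow_right₀ (by norm_num : (1:Int) ≤ 2) (Nat.le_succ N)
    have hfirst : ∀ (x : PySem.Dict Int (PySem.Set Int)),
        List.foldl (outerStep mask i nbits ((N:Int)+1)) x (PySem.List.pyRange 0 (2^N) 1)
          = genSubB x mask (i+1) nbits (N:Int) := by
      intro x
      rw [genSubB, if_neg hN0, hpowN]
      apply PySem.List.foldl_congr_mem
      intro acc s hs
      rw [PySem.List.mem_pyRange_one] at hs
      simp only [outerStep]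
      rw [hbN1, hbN]
      rw [innerRec_low N s i mask 0 hs.1 hs.2]
    have hsecond : ∀ (x : PySem.Dict Int (PySem.Set Int)),
        List.foldl (outerStep mask i nbits ((N:Int)+1)) x (PySem.List.pyRange (2^N) (2^(N+1)) 1)
          = genSubB x (PySem.Int.bor mask ((1 : Int) <<< i.toNat)) (i+1) (nbits+1) (N:Int) := by
      intro x
      rw [genSubB, if_neg hN0, hpowN]
      rw [PySem.List.pyRange_one (2^N) (2^(N+1)), PySem.List.pyRange_one 0 (2^N)]
      have l1 : ((2:Int)^(N+1) - 2^N) = ((2^N : Nat) : Int) := by push_cast; ring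
      have l2 : ((2:Int)^N - 0) = ((2^N : Nat) : Int) := by push_cast; ring
      rw [l1, l2, Int.toNat_natCast, List.foldl_map, List.foldl_map]
      apply PySem.List.foldl_congr_mem
      intro acc k hk
      rw [List.mem_range] at hk
      simp only [outerStep]
      rw [hbN1, hbN]
      have hkpos : (0:Int) ≤ (k:Int) := by positivity
      have hklt : (k:Int) < 2^N := by exact_mod_cast hk
      -- LHS inner value: innerRec (2^N + k) i (N+1) mask 0
      rw [show (2:Int)^N + (k:Int) = (2:Int)^N + (k:Int) from rfl]
      rw [innerRec]
      rw [if_pos (by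
        rw [Int.shiftLeft_eq, one_mul, PySem.Int.floordiv_eq_ediv_of_pos (by positivity)]
        have e : (2:Int)^N + (k:Int) = (k:Int) + 2^N * 1 := by ring
        rw [e, Int.add_mul_ediv_left _ _ (by positivity), Int.ediv_eq_zero_of_lt hkpos hklt]
        decide)]
      rw [innerRec_high N N le_rfl (k:Int) (i+1) _ _ hkpos]
      rw [innerRec_shift N (k:Int) (i+1) _ (0+1)]
      simp only [zero_add]
      congr 1
      ring
    conv_rhs => rw [genSubB, if_neg hNnn, hpow,
      PySem.List.pyRange_one_append 0 (2^N) (2^(N+1)) (by positivity) hle, List.foldl_append]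
    rw [hfirst, hsecond]

-- ===== VERDICT (by name: the statement is the Claim_ definition above) =====
theorem gen_submasks_spec : Claim_equal_gen_submasks := by
  intro ans mask i nbits n _ _
  unfold Spec_gen_submasks gen_submasks gen_submasks_alt
  by_cases hn : n < 0
  · rw [genSubA, genSubB, if_pos hn, if_pos hn]
  · have h := main_eq n.toNat (PySem.Dict.mk ans) mask i nbits
    rw [Int.toNat_of_nonneg (by omega)] at h
    rw [h]
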